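-- pv_equiv track=rewrite | github.com/srush-shah/ai-compliance-system | apps/api/google_adk/tools/compliance_tools.py | match_policy_rules
-- ===== SOURCE A (Python) =====
-- from typing import Any, Dict, List
--
-- def match_policy_rules(content_text: str, rules: List[Any]) -> List[Dict]:
--     """
--     Deterministic matching tool:
--     returns rules whose name appears as substring in content_text (case-insensitive).
--     """
--
--     text = (content_text or "").lower()
--     matches = []
--
--     for r in rules:
--         name = (r.get("name") or "").strip()
--         if name and name.lower() in text:
--             matches.append(r)
--
--     return matches
-- ===== SOURCE B (Python) =====
-- def match_policy_rules(content_text, rules):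
--     """Text-driven multi-pattern scan: collect the distinct non-empty processed
--     names, sweep the text once position by position marking every name that
--     starts there, then filter the rules by the matched-name set."""
--     text = (content_text or "").lower()
--     names = []
--     for r in rules:
--         n = (r.get("name") or "").strip().lower()
--         if n and n not in names:
--             names.append(n)
--     matched = set()
--     for i in range(len(text)):
--         for n in names:
--             if n not in matched and text.startswith(n, i):
--                 matched.add(n)
--     return [r for r in rules if (r.get("name") or "").strip().lower() in matched]
-- ===== Notes on version B (the rewrite author's own statement) =====
-- stated objective: alternative
-- what changed: A drives the loop over the rules and runs one case-insensitive substring test per rule; B inverts the traversal: it collects the distinct non-empty processed names, sweeps the text once position by position marking every name that starts at that position (a naive multi-pattern matcher), and then filters the rules by membership in the matched-name set.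
import Mathlib
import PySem

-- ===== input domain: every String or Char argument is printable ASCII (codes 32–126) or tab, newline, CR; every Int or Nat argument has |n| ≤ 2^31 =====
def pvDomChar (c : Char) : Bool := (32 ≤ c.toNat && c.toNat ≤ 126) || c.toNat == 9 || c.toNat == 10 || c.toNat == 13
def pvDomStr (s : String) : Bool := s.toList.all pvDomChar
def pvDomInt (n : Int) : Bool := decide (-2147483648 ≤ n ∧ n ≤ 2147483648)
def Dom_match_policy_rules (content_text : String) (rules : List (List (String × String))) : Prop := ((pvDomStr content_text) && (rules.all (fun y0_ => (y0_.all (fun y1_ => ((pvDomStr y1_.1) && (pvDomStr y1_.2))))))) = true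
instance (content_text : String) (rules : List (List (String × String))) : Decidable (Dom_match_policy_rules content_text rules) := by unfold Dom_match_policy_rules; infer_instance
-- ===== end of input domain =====

-- B inverts A's traversal: instead of one substring test per rule it sweeps the
-- text once, marking at each position the distinct names that start there, then
-- filters the rules by the matched-name set; objective: alternative structure.

-- ===== PORT A =====
-- name = (r.get("name") or "").strip()   ('x or ""' on a str/None is getD "")
def pvAName (r : List (String × String)) : String :=
  PySem.Str.strip (((PySem.Dict.mk r).get? "name").getD "")

def match_policy_rules (content_text : String) (rules : List (List (String × String))) : List (List (String × String)) :=
  -- text = (content_text or "").lower()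
  let text := PySem.Str.lower (if content_text = "" then "" else content_text)
  rules.foldl (fun acc r =>
    if (!(pvAName r == "")) && PySem.Str.isIn (PySem.Str.lower (pvAName r)) text then
      acc ++ [r]
    else acc) []

-- ===== PORT B =====
-- n = (r.get("name") or "").strip().lower()
def pvBKey (r : List (String × String)) : String :=
  PySem.Str.lower (PySem.Str.strip (((PySem.Dict.mk r).get? "name").getD ""))

-- text.startswith(n, i): exact for 0 ≤ i (the only i used: i ∈ range(len(text)))
-- as 'n is a prefix of text[i:]'
def pvStarts (text : String) (i : Int) (n : String) : Bool :=
  PySem.Chars.startswith (text.toList.drop i.toNat) n.toList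

-- inner loop: for n in names: if n not in matched and text.startswith(n, i): matched.add(n)
def pvMarkAt (names : List String) (text : String) (m : PySem.Set String) (i : Int) : PySem.Set String :=
  names.foldl (fun m n =>
    if (!(PySem.Set.contains m n)) && pvStarts text i n then PySem.Set.add m n else m) m

def match_policy_rules_alt (content_text : String) (rules : List (List (String × String))) : List (List (String × String)) :=
  let text := PySem.Str.lower (if content_text = "" then "" else content_text)
  -- if n and n not in names: names.append(n)   (first-insertion order, distinct)
  let names : List String := rules.foldl (fun ns r =>
    if !(pvBKey r == "") then PySem.Set.add ns (pvBKey r) else ns) PySem.Set.empty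
  -- for i in range(len(text)): …mark names starting at i…
  let matched : PySem.Set String :=
    (PySem.List.pyRange 0 (PySem.Str.len text) 1).foldl (pvMarkAt names text) PySem.Set.empty
  rules.filter (fun r => PySem.Set.contains matched (pvBKey r))

-- ===== PRECONDITION & SPEC =====
def Spec_match_policy_rules (content_text : String) (rules : List (List (String × String))) (out : List (List (String × String))) : Prop := out = match_policy_rules_alt content_text rules
instance (content_text : String) (rules : List (List (String × String))) (out : List (List (String × String))) : Decidable (Spec_match_policy_rules content_text rules out) := by unfold Spec_match_policy_rules; infer_instance

-- ===== CLAIM (what is proved, stated in full; the proofs are below) =====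
def Claim_equal_match_policy_rules : Prop := ∀ (content_text : String) (rules : List (List (String × String))), Dom_match_policy_rules content_text rules → Spec_match_policy_rules content_text rules (match_policy_rules content_text rules)

-- ===== LEMMAS AND PROOFS =====

-- lowering a string preserves emptiness
theorem pv_lower_empty_iff (s : String) : (PySem.Str.lower s == "") = (s == "") := by
  have h : (PySem.Str.lower s).toList = PySem.Chars.lower s.toList := by simp
  apply Bool.eq_iff_iff.mpr
  simp only [beq_iff_eq]
  rw [show (PySem.Str.lower s = "") ↔ ((PySem.Str.lower s).toList = []) from (String.toList_inj (s₂ := "")).symm,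
      show (s = "") ↔ (s.toList = []) from (String.toList_inj (s₂ := "")).symm, h]
  simp [PySem.Chars.lower]

-- membership after the inner marking loop at one position
theorem pv_mem_markAt (names : List String) (text : String) (m : PySem.Set String)
    (i : Int) (n : String) :
    n ∈ pvMarkAt names text m i ↔ n ∈ m ∨ (n ∈ names ∧ pvStarts text i n = true) := by
  induction names generalizing m with
  | nil => simp [pvMarkAt]
  | cons x xs ih =>
    simp only [pvMarkAt, List.foldl_cons] at ih ⊢
    rw [ih]
    have hmem : n ∈ (if (!(PySem.Set.contains m x)) && pvStarts text i x then PySem.Set.add m x else m)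
        ↔ n ∈ m ∨ (n = x ∧ pvStarts text i x = true) := by
      by_cases hs : pvStarts text i x = true
      · by_cases hm : x ∈ m
        · have hc : ((!(PySem.Set.contains m x)) && pvStarts text i x) = false := by
            rw [(PySem.Set.contains_iff m x).mpr hm]; rfl
          rw [hc, if_neg Bool.false_ne_true]
          constructor
          · exact Or.inl
          · rintro (h | ⟨he, -⟩)
            · exact h
            · exact he ▸ hm
        · have hc0 : PySem.Set.contains m x = false := by
            cases h : PySem.Set.contains m x
            · rfl
            · exact absurd ((PySem.Set.contains_iff m x).mp h) hm
          have hc : ((!(PySem.Set.contains m x)) && pvStarts text i x) = true := by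
            rw [hc0, hs]; rfl
          rw [hc, if_pos rfl, PySem.Set.mem_add]
          constructor
          · rintro (h | h)
            · exact Or.inl h
            · exact Or.inr ⟨h, hs⟩
          · rintro (h | ⟨he, -⟩)
            · exact Or.inl h
            · exact Or.inr he
      · have hs' : pvStarts text i x = false := by
          cases h : pvStarts text i x
          · rfl
          · exact absurd h hs
        have hc : ((!(PySem.Set.contains m x)) && pvStarts text i x) = false := by
          rw [hs']; exact Bool.and_false _
        rw [hc, if_neg Bool.false_ne_true]
        constructor
        · exact Or.inl
        · rintro (h | ⟨-, h2⟩)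
          · exact h
          · exact absurd h2 hs
    rw [hmem]
    constructor
    · rintro ((h | ⟨he, hst⟩) | ⟨h1, h2⟩)
      · exact Or.inl h
      · exact Or.inr ⟨List.mem_cons.mpr (Or.inl he), he ▸ hst⟩
      · exact Or.inr ⟨List.mem_cons_of_mem _ h1, h2⟩
    · rintro (h | ⟨h1, h2⟩)
      · exact Or.inl (Or.inl h)
      · rcases List.mem_cons.mp h1 with he | hmm
        · exact Or.inl (Or.inr ⟨he, he ▸ h2⟩)
        · exact Or.inr ⟨hmm, h2⟩

-- membership after the outer sweep over a list of positions
theorem pv_mem_sweep (names : List String) (text : String) (is : List Int)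
    (m : PySem.Set String) (n : String) :
    n ∈ is.foldl (pvMarkAt names text) m ↔
      n ∈ m ∨ (n ∈ names ∧ ∃ i ∈ is, pvStarts text i n = true) := by
  induction is generalizing m with
  | nil => simp
  | cons i is ih =>
    simp only [List.foldl_cons]
    rw [ih, pv_mem_markAt]
    constructor
    · rintro ((h | ⟨h1, h2⟩) | ⟨h1, j, hj, h2⟩)
      · exact Or.inl h
      · exact Or.inr ⟨h1, i, List.mem_cons_self, h2⟩
      · exact Or.inr ⟨h1, j, List.mem_cons_of_mem _ hj, h2⟩
    · rintro (h | ⟨h1, j, hj, h2⟩)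
      · exact Or.inl (Or.inl h)
      · rcases List.mem_cons.mp hj with he | hmm
        · subst he; exact Or.inl (Or.inr ⟨h1, h2⟩)
        · exact Or.inr ⟨h1, j, hmm, h2⟩

-- a nonempty pattern occurs in the text iff it starts at some position of range(len(text))
theorem pv_sweep_complete (text n : String) (hn : ¬ (n = "")) :
    (∃ i ∈ PySem.List.pyRange 0 (PySem.Str.len text) 1, pvStarts text i n = true) ↔
      PySem.Str.isIn n text = true := by
  have hlen : PySem.Str.len text = (text.toList.length : Int) := by
    simp [PySem.Str.len_eq]
  rw [PySem.Str.isIn_iff_infix, ← PySem.Chars.isIn_iff_infix,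
      ← PySem.Chars.exists_prefix_drop_iff_isIn]
  constructor
  · rintro ⟨i, _, hs⟩
    exact ⟨i.toNat, (PySem.Chars.startswith_iff _ _).mp hs⟩
  · rintro ⟨j, hj⟩
    have hnl : n.toList ≠ [] := by
      intro h; exact hn (String.toList_inj.mp (by simp [h]))
    have hjlt : j < text.toList.length := by
      by_contra hge
      rw [List.drop_eq_nil_of_le (Nat.le_of_not_lt hge)] at hj
      exact hnl (List.prefix_nil.mp hj)
    refine ⟨(j : Int), ?_, ?_⟩
    · rw [PySem.List.mem_pyRange_one, hlen]
      constructor <;> omega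
    · have : ((j : Int)).toNat = j := Int.toNat_natCast j
      simpa [pvStarts, this] using (PySem.Chars.startswith_iff (text.toList.drop j) n.toList).mpr hj

-- membership in Source B's names list: exactly the nonempty processed names of the rules
theorem pv_mem_names (rules : List (List (String × String))) (acc : PySem.Set String)
    (n : String) :
    n ∈ rules.foldl (fun ns r =>
        if !(pvBKey r == "") then PySem.Set.add ns (pvBKey r) else ns) acc ↔
      n ∈ acc ∨ (¬ (n = "") ∧ n ∈ rules.map pvBKey) := by
  induction rules generalizing acc with
  | nil => simp
  | cons r rs ih =>
    simp only [List.foldl_cons, List.map_cons]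
    rw [ih]
    have hmem : n ∈ (if !(pvBKey r == "") then PySem.Set.add acc (pvBKey r) else acc)
        ↔ n ∈ acc ∨ (¬ (n = "") ∧ n = pvBKey r) := by
      by_cases hr : pvBKey r = ""
      · have hc : (!(pvBKey r == "")) = false := by simp [hr]
        rw [hc, if_neg Bool.false_ne_true]
        constructor
        · exact Or.inl
        · rintro (h | ⟨h1, h2⟩)
          · exact h
          · exact absurd (h2.trans hr) h1
      · have hc : (!(pvBKey r == "")) = true := by simp [hr]
        rw [hc, if_pos rfl, PySem.Set.mem_add]
        constructor
        · rintro (h | h)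
          · exact Or.inl h
          · exact Or.inr ⟨h ▸ hr, h⟩
        · rintro (h | ⟨-, h2⟩)
          · exact Or.inl h
          · exact Or.inr h2
    rw [hmem]
    constructor
    · rintro ((h | ⟨h1, h2⟩) | ⟨h1, h2⟩)
      · exact Or.inl h
      · exact Or.inr ⟨h1, List.mem_cons.mpr (Or.inl h2)⟩
      · exact Or.inr ⟨h1, List.mem_cons_of_mem _ h2⟩
    · rintro (h | ⟨h1, h2⟩)
      · exact Or.inl (Or.inl h)
      · rcases List.mem_cons.mp h2 with he | hmm
        · exact Or.inl (Or.inr ⟨h1, he⟩)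
        · exact Or.inr ⟨h1, hmm⟩

-- the two filtering predicates agree on every rule of the list
theorem pv_main (text : String) (rules : List (List (String × String))) :
    rules.foldl (fun acc r =>
      if (!(pvAName r == "")) && PySem.Str.isIn (PySem.Str.lower (pvAName r)) text then
        acc ++ [r]
      else acc) []
    = rules.filter (fun r =>
        PySem.Set.contains
          ((PySem.List.pyRange 0 (PySem.Str.len text) 1).foldl
            (pvMarkAt (rules.foldl (fun ns r =>
              if !(pvBKey r == "") then PySem.Set.add ns (pvBKey r) else ns)
              PySem.Set.empty) text)
            PySem.Set.empty)
          (pvBKey r)) := by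
  rw [PySem.List.foldl_append_if_eq_filter, List.nil_append]
  refine (List.filter_congr ?_).symm
  intro r hr
  have hkey : PySem.Str.lower (pvAName r) = pvBKey r := rfl
  apply Bool.eq_iff_iff.mpr
  rw [PySem.Set.contains_iff, pv_mem_sweep, pv_mem_names]
  have hempty : ∀ x : String, x ∈ (PySem.Set.empty : PySem.Set String) ↔ False := by
    intro x; simp [PySem.Set.empty]
  simp only [hempty, false_or]
  have hemp : (pvAName r = "") ↔ (pvBKey r = "") := by
    have h := pv_lower_empty_iff (pvAName r)
    rw [hkey] at h
    constructor <;> intro hc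
    · exact beq_iff_eq.mp (by rw [h]; exact beq_iff_eq.mpr hc)
    · exact beq_iff_eq.mp (by rw [← h]; exact beq_iff_eq.mpr hc)
  rw [Bool.and_eq_true, Bool.not_eq_true', beq_eq_false_iff_ne, hkey]
  constructor
  · rintro ⟨⟨hne', -⟩, hstart⟩
    exact ⟨fun hc => hne' (hemp.mp hc), (pv_sweep_complete text _ hne').mp hstart⟩
  · rintro ⟨hne, hin⟩
    have hne' : ¬ (pvBKey r = "") := fun hc => hne (hemp.mpr hc)
    exact ⟨⟨hne', List.mem_map_of_mem hr⟩, (pv_sweep_complete text _ hne').mpr hin⟩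

-- ===== VERDICT (by name: the statement is the Claim_ definition above) =====
theorem match_policy_rules_spec : Claim_equal_match_policy_rules := by
  intro content_text rules _
  show match_policy_rules content_text rules = match_policy_rules_alt content_text rules
  simp only [match_policy_rules, match_policy_rules_alt]
  exact pv_main (PySem.Str.lower (if content_text = "" then "" else content_text)) rules
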